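-- pv_equiv track=rewrite | github.com/yellowos/DeVo | experiments/nonlinear/exp03_ablation_hparam/plot.py | _ablation_metric_columns
-- ===== SOURCE A (Python) =====
-- def _ablation_metric_columns(rows: list[dict[str, str]]) -> list[str]:
--     if not rows:
--         return []
--     preferred = [
--         "silverbox_nmse",
--         "volterra_wiener_knmse",
--         "duffing_gfrf_re",
--         "volterra_wiener_nmse",
--         "duffing_nmse",
--     ]
--     available = [key for key in rows[0].keys() if key.endswith(("nmse", "knmse", "gfrf_re")) and not key.endswith("_status")]
--     ordered = [key for key in preferred if key in available]
--     for key in available: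
--         if key not in ordered:
--             ordered.append(key)
--     return ordered
-- ===== SOURCE B (Python) =====
-- def _ablation_metric_columns(rows: list[dict[str, str]]) -> list[str]:
--     if not rows:
--         return []
--     preferred = [
--         "silverbox_nmse",
--         "volterra_wiener_knmse",
--         "duffing_gfrf_re",
--         "volterra_wiener_nmse",
--         "duffing_nmse",
--     ]
--     rank = {k: i for i, k in enumerate(preferred)}
--     buckets = [[] for _ in range(len(preferred) + 1)]
--     for key in rows[0]:
--         if key.endswith(("nmse", "knmse", "gfrf_re")) and not key.endswith("_status"):
--             buckets[rank.get(key, len(preferred))].append(key)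
--     out = []
--     for bucket in buckets:
--         out += bucket
--     return out
-- ===== Notes on version B (the rewrite author's own statement) =====
-- stated objective: alternative
-- what changed: Replaces A's two-pass merge (preferred-intersection list plus an append loop with linear membership tests) by a one-pass bucket distribution: each matching key is dropped into a bucket indexed by its preferred rank (last bucket for non-preferred keys) and the buckets are concatenated.
import Mathlib
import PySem

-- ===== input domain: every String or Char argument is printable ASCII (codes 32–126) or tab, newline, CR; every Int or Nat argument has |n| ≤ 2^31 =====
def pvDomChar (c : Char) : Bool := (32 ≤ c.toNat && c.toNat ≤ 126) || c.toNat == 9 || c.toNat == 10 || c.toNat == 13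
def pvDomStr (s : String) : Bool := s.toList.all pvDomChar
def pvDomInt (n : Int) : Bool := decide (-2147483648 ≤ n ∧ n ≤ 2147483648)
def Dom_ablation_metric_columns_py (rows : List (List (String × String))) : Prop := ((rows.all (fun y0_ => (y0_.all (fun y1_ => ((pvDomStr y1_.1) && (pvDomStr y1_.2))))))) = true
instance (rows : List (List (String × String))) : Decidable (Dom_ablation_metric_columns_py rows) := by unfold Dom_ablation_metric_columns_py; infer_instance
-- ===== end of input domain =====

-- B replaces A's two-pass merge by a one-pass bucket distribution keyed by preferred rank (same value; alternative, not measured faster).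

-- ===== PORT A =====
def pvMetricKey (key : String) : Bool :=
  (PySem.Str.endswith key "nmse" || PySem.Str.endswith key "knmse" || PySem.Str.endswith key "gfrf_re")
    && !(PySem.Str.endswith key "_status")

def ablation_metric_columns_py (rows : List (List (String × String))) : List String :=
  match rows with
  | [] => []
  | r0 :: _ =>
    let preferred : List String :=
      ["silverbox_nmse", "volterra_wiener_knmse", "duffing_gfrf_re", "volterra_wiener_nmse", "duffing_nmse"]
    let available : List String := (PySem.Dict.ofList r0).keys.filter (fun key => pvMetricKey key)
    let ordered : List String := preferred.filter (fun key => decide (key ∈ available))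
    available.foldl (fun acc key => if key ∈ acc then acc else acc ++ [key]) ordered

-- ===== PORT B =====
def ablation_metric_columns_py_alt (rows : List (List (String × String))) : List String :=
  match rows with
  | [] => []
  | r0 :: _ =>
    let preferred : List String :=
      ["silverbox_nmse", "volterra_wiener_knmse", "duffing_gfrf_re", "volterra_wiener_nmse", "duffing_nmse"]
    let rank : PySem.Dict String Int :=
      (PySem.List.enumerate preferred).foldl (fun d p => d.insert p.2 p.1) PySem.Dict.empty
    let buckets0 : List (List String) := List.replicate (preferred.length + 1) []
    let buckets :=
      (PySem.Dict.ofList r0).keys.foldl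
        (fun bs key =>
          if (PySem.Str.endswith key "nmse" || PySem.Str.endswith key "knmse" || PySem.Str.endswith key "gfrf_re")
              && !(PySem.Str.endswith key "_status") then
            -- buckets[rank.get(key, len(preferred))].append(key); the index is a rank in
            -- 0..len(preferred), always nonnegative and in range, so .toNat/modify is exact here
            bs.modify (rank.getD key (preferred.length : Int)).toNat (fun b => b ++ [key])
          else bs)
        buckets0
    buckets.foldl (fun out bucket => out ++ bucket) []

-- ===== PRECONDITION & SPEC =====
def Spec_ablation_metric_columns_py (rows : List (List (String × String))) (out : List String) : Prop := out = ablation_metric_columns_py_alt rows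
instance (rows : List (List (String × String))) (out : List String) : Decidable (Spec_ablation_metric_columns_py rows out) := by unfold Spec_ablation_metric_columns_py; infer_instance

-- ===== CLAIM (what is proved, stated in full; the proofs are below) =====
def Claim_equal_ablation_metric_columns_py : Prop := ∀ (rows : List (List (String × String))), Dom_ablation_metric_columns_py rows → Spec_ablation_metric_columns_py rows (ablation_metric_columns_py rows)

-- ===== LEMMAS AND PROOFS =====

-- the preferred list, the rank dictionary and B's bucket index, as proof-side abbreviations
def pvP : List String :=
  ["silverbox_nmse", "volterra_wiener_knmse", "duffing_gfrf_re", "volterra_wiener_nmse", "duffing_nmse"]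

def pvRank : PySem.Dict String Int :=
  (PySem.List.enumerate pvP).foldl (fun d p => d.insert p.2 p.1) PySem.Dict.empty

def pvKey (k : String) : Nat :=
  match PySem.List.index? pvP k with
  | some i => i
  | none => pvP.length

-- pvKey as an explicit if-chain over the five preferred names
theorem pv_key_cases (k : String) :
    pvKey k = if k = "silverbox_nmse" then 0 else if k = "volterra_wiener_knmse" then 1
      else if k = "duffing_gfrf_re" then 2 else if k = "volterra_wiener_nmse" then 3
      else if k = "duffing_nmse" then 4 else 5 := by
  unfold pvKey pvP
  split_ifs with h1 h2 h3 h4 h5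
  · subst h1; decide
  · subst h2; decide
  · subst h3; decide
  · subst h4; decide
  · subst h5; decide
  · have hnone : PySem.List.index?
        ["silverbox_nmse", "volterra_wiener_knmse", "duffing_gfrf_re", "volterra_wiener_nmse", "duffing_nmse"] k = none :=
      (PySem.List.index?_eq_none_iff _ _).mpr (by simp_all)
    rw [hnone]
    rfl

theorem pv_key_eq_five_iff (k : String) : pvKey k = 5 ↔ k ∉ pvP := by
  rw [pv_key_cases]
  split_ifs with h1 h2 h3 h4 h5 <;> simp_all [pvP]

-- B's dictionary lookup of the rank is exactly pvKey
theorem pv_rank_getD (k : String) : (pvRank.getD k (5 : Int)).toNat = pvKey k := by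
  have hm : pvRank = PySem.Dict.mk
      [("silverbox_nmse", 0), ("volterra_wiener_knmse", 1), ("duffing_gfrf_re", 2),
       ("volterra_wiener_nmse", 3), ("duffing_nmse", 4)] := by decide
  rw [pv_key_cases, hm, PySem.Dict.getD_eq_get?_getD]
  by_cases h1 : k = "silverbox_nmse"
  · subst h1; decide
  rw [if_neg h1]
  by_cases h2 : k = "volterra_wiener_knmse"
  · subst h2; decide
  rw [if_neg h2]
  by_cases h3 : k = "duffing_gfrf_re"
  · subst h3; decide
  rw [if_neg h3]
  by_cases h4 : k = "volterra_wiener_nmse"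
  · subst h4; decide
  rw [if_neg h4]
  by_cases h5 : k = "duffing_nmse"
  · subst h5; decide
  rw [if_neg h5]
  have hnone : (PySem.Dict.mk
      ([("silverbox_nmse", 0), ("volterra_wiener_knmse", 1), ("duffing_gfrf_re", 2),
        ("volterra_wiener_nmse", 3), ("duffing_nmse", 4)] : List (String × Int))).get? k = none := by
    simp only [PySem.Dict.get?_mk_cons, beq_iff_eq]
    rw [if_neg (fun h => h1 h.symm), if_neg (fun h => h2 h.symm), if_neg (fun h => h3 h.symm),
        if_neg (fun h => h4 h.symm), if_neg (fun h => h5 h.symm)]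
    rfl
  rw [hnone]
  rfl

-- A's append-if-absent loop over a duplicate-free list appends exactly the new elements
theorem pv_foldl_dedup_append (xs : List String) (hnd : xs.Nodup) (acc : List String) :
    xs.foldl (fun acc key => if key ∈ acc then acc else acc ++ [key]) acc
      = acc ++ xs.filter (fun k => decide (k ∉ acc)) := by
  induction xs generalizing acc with
  | nil => simp
  | cons x xs' ih =>
    have hx : x ∉ xs' := (List.nodup_cons.mp hnd).1
    have hnd' : xs'.Nodup := (List.nodup_cons.mp hnd).2
    simp only [List.foldl_cons, List.filter_cons]
    by_cases hmem : x ∈ acc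
    · simp only [if_pos hmem, decide_eq_true_eq]
      rw [ih hnd']
      simp [hmem]
    · simp only [if_neg hmem, decide_eq_true_eq]
      rw [ih hnd']
      have hcongr : xs'.filter (fun k => decide (k ∉ acc ++ [x])) = xs'.filter (fun k => decide (k ∉ acc)) := by
        refine List.filter_congr (fun k hk => ?_)
        have : k ≠ x := fun h => hx (h ▸ hk)
        simp [List.mem_append, this]
      rw [hcongr]
      simp [hmem]

-- a nodup list filtered to one element
theorem pv_filter_single (xs : List String) (hnd : xs.Nodup) (a : String) :
    xs.filter (fun k => decide (k = a)) = if a ∈ xs then [a] else [] := by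
  induction xs with
  | nil => simp
  | cons x xs' ih =>
    have hx : x ∉ xs' := (List.nodup_cons.mp hnd).1
    have hnd' : xs'.Nodup := (List.nodup_cons.mp hnd).2
    simp only [List.filter_cons, List.mem_cons]
    by_cases hxa : x = a
    · subst hxa
      simp [ih hnd', hx]
    · simp [hxa, ih hnd', Ne.symm hxa]

-- the bucket concatenation equals A's merge, for duplicate-free available lists
theorem pv_buckets_eq_merge (av : List String) (hnd : av.Nodup) :
    (List.range 6).flatMap (fun j => av.filter (fun x => decide (pvKey x = j)))
      = pvP.filter (fun key => decide (key ∈ av)) ++ av.filter (fun k => decide (k ∉ pvP)) := by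
  have hb : ∀ (j : Nat) (a : String), (∀ k : String, pvKey k = j ↔ k = a) →
      av.filter (fun x => decide (pvKey x = j)) = if a ∈ av then [a] else [] := by
    intro j a hiff
    have hcg : av.filter (fun x => decide (pvKey x = j)) = av.filter (fun k => decide (k = a)) :=
      List.filter_congr (fun k _ => by simp [hiff k])
    rw [hcg, pv_filter_single av hnd a]
  have h0 := hb 0 "silverbox_nmse" (fun k => by rw [pv_key_cases]; split_ifs <;> simp_all)
  have h1 := hb 1 "volterra_wiener_knmse" (fun k => by rw [pv_key_cases]; split_ifs <;> simp_all)
  have h2 := hb 2 "duffing_gfrf_re" (fun k => by rw [pv_key_cases]; split_ifs <;> simp_all)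
  have h3 := hb 3 "volterra_wiener_nmse" (fun k => by rw [pv_key_cases]; split_ifs <;> simp_all)
  have h4 := hb 4 "duffing_nmse" (fun k => by rw [pv_key_cases]; split_ifs <;> simp_all)
  have h5 : av.filter (fun x => decide (pvKey x = 5)) = av.filter (fun k => decide (k ∉ pvP)) :=
    List.filter_congr (fun k _ => by simp [pv_key_eq_five_iff k])
  have hrange : List.range 6 = [0, 1, 2, 3, 4, 5] := by decide
  rw [hrange]
  simp only [List.flatMap_cons, List.flatMap_nil, List.append_nil, h0, h1, h2, h3, h4, h5]
  simp only [pvP, List.filter_cons, List.filter_nil, decide_eq_true_eq]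
  split_ifs <;> simp

-- B's distribution loop fills bucket j with exactly the matching keys of rank j, in order
theorem pv_foldl_buckets (p : String → Bool) (ks : List String) (bs : List (List String))
    (hlen : bs.length = 6) :
    ks.foldl (fun bs key => if p key then bs.modify (pvKey key) (fun b => b ++ [key]) else bs) bs
      = (List.range 6).map (fun j => bs.getD j [] ++ ks.filter (fun k => p k && decide (pvKey k = j))) := by
  induction ks generalizing bs with
  | nil =>
    simp only [List.foldl_nil, List.filter_nil, List.append_nil]
    refine List.ext_getElem (by simp [hlen]) ?_
    intro i hi _
    have hi6 : i < 6 := by omega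
    rw [List.getElem_map, List.getElem_range, List.getD_eq_getElem?_getD,
        List.getElem?_eq_getElem hi]
    rfl
  | cons k ks' ih =>
    simp only [List.foldl_cons]
    by_cases hp : p k
    · rw [if_pos hp, ih _ (by simp [hlen])]
      refine List.map_congr_left (fun j hj => ?_)
      have hj6 : j < 6 := List.mem_range.mp hj
      have hget : (bs.modify (pvKey k) (fun b => b ++ [k])).getD j []
          = if pvKey k = j then bs.getD j [] ++ [k] else bs.getD j [] := by
        simp only [List.getD_eq_getElem?_getD, List.getElem?_modify]
        have : j < bs.length := by omega
        simp [List.getElem?_eq_getElem this]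
      rw [hget]
      simp only [List.filter_cons, hp, Bool.true_and]
      by_cases hk : pvKey k = j <;> simp [hk]
    · rw [if_neg hp, ih _ hlen]
      refine List.map_congr_left (fun j _ => ?_)
      simp [hp]

-- folding list concatenation is flattening
theorem pv_foldl_append (l : List (List String)) (acc : List String) :
    l.foldl (fun out bucket => out ++ bucket) acc = acc ++ l.flatten := by
  induction l generalizing acc with
  | nil => simp
  | cons b l' ih => simp [ih]

-- ===== VERDICT (by name: the statement is the Claim_ definition above) =====
theorem ablation_metric_columns_py_spec : Claim_equal_ablation_metric_columns_py := by
  intro rows _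
  unfold Spec_ablation_metric_columns_py ablation_metric_columns_py ablation_metric_columns_py_alt
  cases rows with
  | nil => rfl
  | cons r0 rest =>
    simp only
    set ks : List String := (PySem.Dict.ofList r0).keys with hks
    have hnd : ks.Nodup := PySem.Dict.nodup_keys_ofList r0
    have hrank : ∀ key : String,
        (((PySem.List.enumerate ((["silverbox_nmse", "volterra_wiener_knmse", "duffing_gfrf_re", "volterra_wiener_nmse", "duffing_nmse"] : List String))).foldl
            (fun d p => d.insert p.2 p.1) PySem.Dict.empty).getD key
          (((["silverbox_nmse", "volterra_wiener_knmse", "duffing_gfrf_re", "volterra_wiener_nmse", "duffing_nmse"] : List String)).length : Int)).toNat = pvKey key := fun k => pv_rank_getD k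
    have h6 : ((["silverbox_nmse", "volterra_wiener_knmse", "duffing_gfrf_re", "volterra_wiener_nmse", "duffing_nmse"] : List String)).length + 1 = 6 := rfl
    simp only [hrank, h6, ← pvMetricKey.eq_def]
    rw [pv_foldl_buckets pvMetricKey ks (List.replicate 6 []) (by simp),
        pv_foldl_append, List.nil_append, ← List.flatMap_def]
    have hmap : (List.range 6).flatMap (fun j => (List.replicate 6 ([] : List String)).getD j [] ++
          ks.filter (fun k => pvMetricKey k && decide (pvKey k = j)))
        = (List.range 6).flatMap (fun j => (ks.filter (fun key => pvMetricKey key)).filter (fun x => decide (pvKey x = j))) := by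
      refine List.flatMap_congr (fun j hj => ?_)
      have hj6 : j < 6 := List.mem_range.mp hj
      have hcg : ks.filter (fun k => pvMetricKey k && decide (pvKey k = j))
          = ks.filter (fun a => decide (pvKey a = j) && pvMetricKey a) :=
        List.filter_congr (fun k _ => by by_cases h : pvMetricKey k <;> simp [h])
      rw [List.filter_filter, ← hcg]
      have hz : (List.replicate 6 ([] : List String)).getD j [] = [] := by
        interval_cases j <;> rfl
      rw [hz, List.nil_append]
    rw [hmap, pv_buckets_eq_merge _ (hnd.filter _), pv_foldl_dedup_append _ (hnd.filter _)]
    congr 1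
    refine List.filter_congr (fun k hk => ?_)
    have hk' : k ∈ ks ∧ pvMetricKey k = true := List.mem_filter.mp hk
    simp [List.mem_filter, pvP, hk'.1, hk'.2]
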